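-- pv_equiv track=rewrite | github.com/Khan/frankenserver | python/google/appengine/tools/devappserver2/inotify_file_watcher.py | _bit_str
-- ===== SOURCE A (Python) =====
-- def _bit_str(bits, mask_names):
--   """Convert a bit field to list of names.
--
--   Args:
--     bits: an int that holds a combined bit field.
--     mask_names: a mapping from individual bit masks to names.
--
--   Returns:
--     A human readable presentation of the combined bit field.
--   """
--   hex_str = hex(bits)
--   names = []
--   mask = 0x1
--   while bits:
--     if bits & mask:
--       bits &= ~mask
--       names.append(mask_names.get(mask, '(0x%x)' % mask))
--     mask <<= 1
--   return '%s (%s)' % ('|'.join(names), hex_str)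
-- ===== SOURCE B (Python) =====
-- def _bit_str(bits, mask_names):
--   """Convert a bit field to list of names (lowest-set-bit extraction)."""
--   hex_str = hex(bits)
--   names = []
--   while bits:
--     rest = bits & (bits - 1)     # clear the lowest set bit
--     low = bits ^ rest            # the lowest set bit alone
--     names.append(mask_names.get(low, '(0x%x)' % low))
--     bits = rest
--   return '%s (%s)' % ('|'.join(names), hex_str)
-- ===== Notes on version B (the rewrite author's own statement) =====
-- stated objective: idiomatic
-- what changed: B extracts only the set bits directly with low = bits ^ (bits & (bits-1)) (O(popcount) iterations) instead of A's walk over every bit position with a doubling mask (O(highest-bit-index) iterations).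
import Mathlib
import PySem

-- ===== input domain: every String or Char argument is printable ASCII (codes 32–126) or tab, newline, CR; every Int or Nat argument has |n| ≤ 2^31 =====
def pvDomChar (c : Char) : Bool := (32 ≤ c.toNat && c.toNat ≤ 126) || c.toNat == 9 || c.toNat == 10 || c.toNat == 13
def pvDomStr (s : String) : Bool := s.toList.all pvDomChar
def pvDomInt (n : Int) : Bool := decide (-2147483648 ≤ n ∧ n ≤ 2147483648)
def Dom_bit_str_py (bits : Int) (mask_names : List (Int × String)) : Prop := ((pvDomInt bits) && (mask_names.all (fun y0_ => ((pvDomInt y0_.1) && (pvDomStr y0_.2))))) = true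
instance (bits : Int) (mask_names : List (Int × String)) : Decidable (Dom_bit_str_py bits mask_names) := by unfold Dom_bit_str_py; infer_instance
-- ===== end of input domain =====

-- B extracts only the SET bits (low = bits ^ (bits & (bits-1))) instead of A's walk over
-- every bit position with a doubling mask (for bits < 0 both Python loops never terminate,
-- so nothing about Python is claimed there; the ports compute on bits.toNat and agree).

-- ===== PORT A =====
-- hex(n) for n ≥ 0 (lowercase digits); '%x' % n is the same digits without the '0x' prefix
def pyHexDigit (n : Nat) : Char := if n < 10 then Char.ofNat (48 + n) else Char.ofNat (87 + n)

def pyHexDigits (n : Nat) : List Char :=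
  if h : n = 0 then [] else pyHexDigits (n / 16) ++ [pyHexDigit (n % 16)]
  termination_by n
  decreasing_by exact Nat.div_lt_self (Nat.pos_of_ne_zero h) (by norm_num)

def pyHex (n : Nat) : String :=
  if n = 0 then "0x0" else "0x" ++ String.mk (pyHexDigits n)

-- b &&& 2^k ≠ 0 ↔ bit k of b is set (used by the loop-step lemmas the port cites)
theorem pvAndPow (b k : Nat) : (b &&& 2^k ≠ 0) ↔ b / 2^k % 2 = 1 := by
  rw [Nat.and_two_pow]
  rcases hbit : b.testBit k with hf | ht <;>
    simp_all [Nat.testBit_eq_decide_div_mod_eq]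

-- loop-step facts for A (invariant: mask = 2^k and all bits of b below the mask are cleared)
theorem pvStepSet (b k : Nat) (hmod : b % 2^k = 0) (hbit : b &&& 2^k ≠ 0) :
    (b - 2^k) % (2^k*2) = 0 ∧ (b - 2^k) / (2^k*2) = (b / 2^k) / 2 ∧
      (b - 2^k) / (2^k*2) < b / 2^k := by
  have hp : 0 < 2^k := Nat.pow_pos (by norm_num)
  have hodd : b / 2^k % 2 = 1 := (pvAndPow b k).mp hbit
  have hbq : 2^k * (b / 2^k) = b := Nat.mul_div_cancel' (Nat.dvd_of_mod_eq_zero hmod)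
  obtain ⟨q, hq⟩ : ∃ q, q = b / 2^k := ⟨_, rfl⟩
  rw [← hq] at hodd hbq ⊢
  have h1 : b - 2^k = 2^k * (q-1) := by rw [Nat.mul_sub, Nat.mul_one, hbq]
  have h2 : (2^k * (q-1)) % (2^k * 2) = 2^k * ((q-1) % 2) := Nat.mul_mod_mul_left _ _ _
  have h3 : (2^k * (q-1)) / (2^k * 2) = (q-1) / 2 := Nat.mul_div_mul_left _ _ hp
  have hq2 : (q-1) % 2 = 0 := by omega
  have hq0 : q ≠ 0 := by omega
  have e1 : (q-1)/2 = q/2 := by omega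
  refine ⟨?_, ?_, ?_⟩
  · rw [h1, h2, hq2, Nat.mul_zero]
  · rw [h1, h3, e1]
  · rw [h1, h3, e1]; exact Nat.div_lt_self (Nat.pos_of_ne_zero hq0) (by norm_num)

theorem pvStepUnset (b k : Nat) (hb : b ≠ 0) (hmod : b % 2^k = 0) (hbit : b &&& 2^k = 0) :
    b % (2^k*2) = 0 ∧ b / (2^k*2) = (b / 2^k) / 2 ∧ b / (2^k*2) < b / 2^k := by
  have hp : 0 < 2^k := Nat.pow_pos (by norm_num)
  have heven : ¬ (b / 2^k % 2 = 1) := by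
    intro h; exact absurd ((pvAndPow b k).mpr h) (by simp [hbit])
  have hbq : 2^k * (b / 2^k) = b := Nat.mul_div_cancel' (Nat.dvd_of_mod_eq_zero hmod)
  obtain ⟨q, hq⟩ : ∃ q, q = b / 2^k := ⟨_, rfl⟩
  rw [← hq] at heven hbq ⊢
  have h2 : (2^k * q) % (2^k * 2) = 2^k * (q % 2) := Nat.mul_mod_mul_left _ _ _
  have h3 : (2^k * q) / (2^k * 2) = q / 2 := Nat.mul_div_mul_left _ _ hp
  have hq2 : q % 2 = 0 := by omega
  have hq0 : q ≠ 0 := by intro h0; rw [h0, Nat.mul_zero] at hbq; exact hb hbq.symm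
  refine ⟨?_, ?_, ?_⟩
  · rw [← hbq, h2, hq2, Nat.mul_zero]
  · rw [← hbq, h3]
  · rw [← hbq, h3]; exact Nat.div_lt_self (Nat.pos_of_ne_zero hq0) (by norm_num)

-- the while loop of A: state (bits, mask); 'bits &= ~mask' clears bit k exactly, i.e.
-- subtracts mask (exact since bits &&& mask ≠ 0 and mask = 2^k divides bits); 'mask <<= 1'
-- doubles the mask
def bitStrLoopA (mask_names : List (Int × String)) (b m : Nat)
    (h : b % m = 0 ∧ ∃ k, m = 2^k) : List String :=
  if hb : b = 0 then []
  else if hbit : b &&& m ≠ 0 then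
    PySem.Dict.getD (PySem.Dict.mk mask_names) (m : Int) ("(0x" ++ String.mk (pyHexDigits m) ++ ")")
      :: bitStrLoopA mask_names (b - m) (m*2)
          (by obtain ⟨hmod, k, rfl⟩ := h
              exact ⟨(pvStepSet b k hmod hbit).1, k+1, (pow_succ 2 k).symm⟩)
  else
    bitStrLoopA mask_names b (m*2)
      (by obtain ⟨hmod, k, rfl⟩ := h
          exact ⟨(pvStepUnset b k hb hmod (not_not.mp hbit)).1, k+1, (pow_succ 2 k).symm⟩)
  termination_by b / m
  decreasing_by
  · obtain ⟨hmod, k, rfl⟩ := h; exact (pvStepSet b k hmod hbit).2.2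
  · obtain ⟨hmod, k, rfl⟩ := h; exact (pvStepUnset b k hb hmod (not_not.mp hbit)).2.2

def bit_str_py (bits : Int) (mask_names : List (Int × String)) : String :=
  -- the loop runs on the integer value; for bits < 0 Python's loop never terminates
  -- so the port computes on bits.toNat
  let hex_str := pyHex bits.toNat
  let names := bitStrLoopA mask_names bits.toNat 1 ⟨Nat.mod_one _, 0, rfl⟩
  PySem.Str.join "|" names ++ " (" ++ hex_str ++ ")"

-- ===== PORT B =====
-- the while loop of B: rest = bits & (bits-1) clears the lowest set bit, low = bits ^ rest
def bitStrLoopB (mask_names : List (Int × String)) (b : Nat) : List String :=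
  if hb : b = 0 then []
  else
    let rest := b &&& (b - 1)
    let low := b ^^^ rest
    PySem.Dict.getD (PySem.Dict.mk mask_names) (low : Int) ("(0x" ++ String.mk (pyHexDigits low) ++ ")")
      :: bitStrLoopB mask_names rest
  termination_by b
  decreasing_by exact Nat.lt_of_le_of_lt Nat.and_le_right (by omega)

def bit_str_py_alt (bits : Int) (mask_names : List (Int × String)) : String :=
  -- for bits < 0 Python's loop never terminates: the port computes on bits.toNat
  let hex_str := pyHex bits.toNat
  let names := bitStrLoopB mask_names bits.toNat
  PySem.Str.join "|" names ++ " (" ++ hex_str ++ ")"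

-- ===== PRECONDITION & SPEC =====
def Spec_bit_str_py (bits : Int) (mask_names : List (Int × String)) (out : String) : Prop := out = bit_str_py_alt bits mask_names
instance (bits : Int) (mask_names : List (Int × String)) (out : String) : Decidable (Spec_bit_str_py bits mask_names out) := by unfold Spec_bit_str_py; infer_instance

-- ===== CLAIM (what is proved, stated in full; the proofs are below) =====
def Claim_equal_bit_str_py : Prop := ∀ (bits : Int) (mask_names : List (Int × String)), Dom_bit_str_py bits mask_names → Spec_bit_str_py bits mask_names (bit_str_py bits mask_names)

-- ===== LEMMAS AND PROOFS =====

theorem pvDiv2Even (a : Nat) : (2*a)/2 = a := by omega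
theorem pvDiv2Odd (a : Nat) : (2*a+1)/2 = a := by omega

theorem pvXorTwoMul (a b : Nat) : (2*a) ^^^ (2*b) = 2*(a ^^^ b) := by
  apply Nat.eq_of_testBit_eq; intro i
  cases i with
  | zero => simp [Nat.testBit_zero, Nat.mul_mod_right]
  | succ n => simp [Nat.testBit_succ, Nat.xor_div_two, pvDiv2Even, Nat.testBit_xor]

theorem pvAndTwoMul (c : Nat) (h : c ≠ 0) : (2*c) &&& (2*c-1) = 2*(c &&& (c-1)) := by
  have h2 : 2*c - 1 = 2*(c-1)+1 := by omega
  rw [h2]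
  apply Nat.eq_of_testBit_eq; intro i
  cases i with
  | zero => simp [Nat.testBit_zero, Nat.mul_mod_right]
  | succ n => simp [Nat.testBit_succ, Nat.and_div_two, pvDiv2Even, pvDiv2Odd, Nat.testBit_and]

theorem pvAndPredOdd (b : Nat) (h : b % 2 = 1) : b &&& (b-1) = b - 1 := by
  obtain ⟨c, rfl⟩ : ∃ c, b = 2*c+1 := ⟨b/2, by omega⟩
  have h2 : 2*c+1-1 = 2*c := by omega
  rw [h2]
  apply Nat.eq_of_testBit_eq; intro i
  cases i with
  | zero => simp [Nat.testBit_zero, Nat.mul_mod_right, Nat.mul_add_mod]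
  | succ n => simp [Nat.testBit_succ, Nat.and_div_two, pvDiv2Even, pvDiv2Odd, Nat.testBit_and]

theorem pvXorPredOdd (b : Nat) (h : b % 2 = 1) : b ^^^ (b &&& (b-1)) = 1 := by
  rw [pvAndPredOdd b h]
  obtain ⟨c, rfl⟩ : ∃ c, b = 2*c+1 := ⟨b/2, by omega⟩
  have h2 : 2*c+1-1 = 2*c := by omega
  rw [h2]
  apply Nat.eq_of_testBit_eq; intro i
  cases i with
  | zero => simp [Nat.testBit_zero, Nat.mul_add_mod, Nat.mul_mod_right]
  | succ n => simp [Nat.testBit_succ, Nat.xor_div_two, pvDiv2Even, pvDiv2Odd, Nat.testBit_xor]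

-- the list of set-bit masks of b, in ascending order
def bitsList (b : Nat) : List Nat :=
  if h : b = 0 then []
  else (if b % 2 = 1 then [1] else []) ++ (bitsList (b/2)).map (· * 2)
  termination_by b
  decreasing_by exact Nat.div_lt_self (Nat.pos_of_ne_zero h) (by norm_num)

-- the masks B's loop extracts (lowest set bit first)
def masksB (b : Nat) : List Nat :=
  if h : b = 0 then []
  else (b ^^^ (b &&& (b-1))) :: masksB (b &&& (b-1))
  termination_by b
  decreasing_by exact Nat.lt_of_le_of_lt Nat.and_le_right (by omega)

def pvEntry (mask_names : List (Int × String)) (m : Nat) : String :=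
  PySem.Dict.getD (PySem.Dict.mk mask_names) (m : Int) ("(0x" ++ String.mk (pyHexDigits m) ++ ")")

theorem loopA_eq (mn : List (Int × String)) (b k : Nat)
    (h : b % 2^k = 0 ∧ ∃ j, (2^k : Nat) = 2^j) :
    bitStrLoopA mn b (2^k) h = (bitsList (b / 2^k)).map (fun m => pvEntry mn (2^k * m)) := by
  induction hq : b / 2^k using Nat.strong_induction_on generalizing b k with
  | _ q IH =>
  subst hq
  rw [bitStrLoopA]
  by_cases hb : b = 0
  · rw [bitsList]; simp [hb]
  · have hmod := h.1
    have hp : 0 < 2^k := Nat.pow_pos (by norm_num)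
    have hbq : 2^k * (b / 2^k) = b := Nat.mul_div_cancel' (Nat.dvd_of_mod_eq_zero hmod)
    have hqne : b / 2^k ≠ 0 := by intro h0; rw [h0, Nat.mul_zero] at hbq; exact hb hbq.symm
    rw [dif_neg hb]
    by_cases hbit : b &&& 2^k ≠ 0
    · obtain ⟨hm', hd', hlt'⟩ := pvStepSet b k hmod hbit
      have hodd : b / 2^k % 2 = 1 := (pvAndPow b k).mp hbit
      rw [dif_pos hbit, bitsList, dif_neg hqne, if_pos hodd]
      simp only [List.cons_append, List.nil_append, List.map_cons, List.map_map]
      congr 1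
      · show pvEntry mn (2^k) = pvEntry mn (2^k * 1); rw [Nat.mul_one]
      · rw [show ((fun m => pvEntry mn (2^k * m)) ∘ (· * 2)) = (fun m => pvEntry mn (2^(k+1) * m))
              from funext fun m => by show pvEntry mn (2^k * (m*2)) = _; congr 1; rw [pow_succ]; ring]
        exact IH ((b / 2^k) / 2) (by omega) (b - 2^k) (k+1)
          ⟨by rw [pow_succ]; exact hm', k+1, rfl⟩ (by rw [pow_succ]; exact hd')
    · obtain ⟨hm', hd', hlt'⟩ := pvStepUnset b k hb hmod (not_not.mp hbit)
      have heven : ¬ (b / 2^k % 2 = 1) := fun hh => hbit ((pvAndPow b k).mpr hh)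
      rw [dif_neg hbit, bitsList, dif_neg hqne, if_neg heven]
      simp only [List.nil_append, List.map_map]
      rw [show ((fun m => pvEntry mn (2^k * m)) ∘ (· * 2)) = (fun m => pvEntry mn (2^(k+1) * m))
            from funext fun m => by show pvEntry mn (2^k * (m*2)) = _; congr 1; rw [pow_succ]; ring]
      exact IH ((b / 2^k) / 2) (by omega) b (k+1)
        ⟨by rw [pow_succ]; exact hm', k+1, rfl⟩ (by rw [pow_succ]; exact hd')

theorem loopB_eq (mn : List (Int × String)) (b : Nat) :
    bitStrLoopB mn b = (masksB b).map (pvEntry mn) := by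
  induction b using Nat.strong_induction_on with
  | _ b IH =>
  rw [bitStrLoopB, masksB]
  by_cases hb : b = 0
  · simp [hb]
  · rw [dif_neg hb, dif_neg hb]
    simp only [List.map_cons]
    exact congrArg _ (IH _ (Nat.lt_of_le_of_lt Nat.and_le_right (by omega)))

theorem masksB_double (c : Nat) : masksB (2*c) = (masksB c).map (· * 2) := by
  induction c using Nat.strong_induction_on with
  | _ c IH =>
  by_cases hc : c = 0
  · subst hc; rw [masksB, masksB]; simp
  · have h2c : 2*c ≠ 0 := by omega
    conv_lhs => rw [masksB]
    conv_rhs => rw [masksB]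
    rw [dif_neg h2c, dif_neg hc]
    simp only [List.map_cons]
    congr 1
    · rw [pvAndTwoMul c hc, pvXorTwoMul, Nat.mul_comm]
    · rw [pvAndTwoMul c hc]
      exact IH _ (Nat.lt_of_le_of_lt Nat.and_le_right (by omega))

theorem masksB_eq_bitsList (b : Nat) : masksB b = bitsList b := by
  induction b using Nat.strong_induction_on with
  | _ b IH =>
  by_cases hb : b = 0
  · subst hb; rw [masksB, bitsList]; simp
  · by_cases hodd : b % 2 = 1
    · conv_lhs => rw [masksB]
      conv_rhs => rw [bitsList]
      rw [dif_neg hb, dif_neg hb, pvXorPredOdd b hodd, pvAndPredOdd b hodd, if_pos hodd]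
      have hb1 : b - 1 = 2*(b/2) := by omega
      rw [hb1, masksB_double, IH _ (Nat.div_lt_self (Nat.pos_of_ne_zero hb) (by norm_num))]
      simp
    · have hb2 : b = 2*(b/2) := by omega
      conv_lhs => rw [hb2]
      conv_rhs => rw [bitsList]
      rw [dif_neg hb, if_neg hodd, masksB_double,
        IH _ (Nat.div_lt_self (Nat.pos_of_ne_zero hb) (by norm_num))]
      simp

-- ===== VERDICT (by name: the statement is the Claim_ definition above) =====
theorem bit_str_py_spec : Claim_equal_bit_str_py := by
  intro bits mn _
  unfold Spec_bit_str_py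
  show PySem.Str.join "|" (bitStrLoopA mn bits.toNat 1 ⟨Nat.mod_one _, 0, rfl⟩) ++ " (" ++ pyHex bits.toNat ++ ")"
      = PySem.Str.join "|" (bitStrLoopB mn bits.toNat) ++ " (" ++ pyHex bits.toNat ++ ")"
  have hA : bitStrLoopA mn bits.toNat (2^0) ⟨Nat.mod_one _, 0, rfl⟩
      = (bitsList bits.toNat).map (pvEntry mn) :=
    (loopA_eq mn bits.toNat 0 ⟨Nat.mod_one _, 0, rfl⟩).trans (by simp)
  have hB : bitStrLoopB mn bits.toNat = (bitsList bits.toNat).map (pvEntry mn) := by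
    rw [loopB_eq, masksB_eq_bitsList]
  exact congrArg (fun l => PySem.Str.join "|" l ++ " (" ++ pyHex bits.toNat ++ ")")
    (hA.trans hB.symm)
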